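-- pv_equiv track=rewrite | github.com/uni-rajashekar-hs/Transcript-Processor | app.py | reformat_json_transcript
-- ===== SOURCE A (Python) =====
-- def reformat_json_transcript(data: dict) -> dict:
--     transcript = data["transcript"]
--     turns = [t.strip() for t in transcript.split('\n') if t.strip()]
--     formatted_turns = []
--     start_offset = 0
--
--     for turn_id, turn in enumerate(turns):
--         if ':' not in turn:
--             continue
--         speaker_id, words = turn.split(':', 1)
--         word_count = len(words.strip().split())
--         end_offset = start_offset + word_count
--         line = f"{turn_id}, {start_offset:.2f}, {end_offset:.2f}, {speaker_id.strip()}, {words.strip()}"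
--         formatted_turns.append(line)
--         start_offset = end_offset
--
--     final_transcript = "turn ID, start time, end time, speaker ID, words\n" + "\n".join(formatted_turns)
--     return {"transcript": final_transcript}
-- ===== SOURCE B (Python) =====
-- from itertools import accumulate
--
--
-- def reformat_json_transcript(data: dict) -> dict:
--     transcript = data["transcript"]
--     lines = [t.strip() for t in transcript.split('\n') if t.strip()]
--     # parse pass: keep the enumerate index so ':'-less lines still consume an id
--     records = [(i, s.strip(), w.strip())
--                for i, line in enumerate(lines) if ':' in line
--                for s, w in [line.split(':', 1)]]
--     counts = [len(w.split()) for _, _, w in records]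
--     starts = list(accumulate([0] + counts))  # prefix sums of word counts
--     rows = [f"{i}, {st:.2f}, {st + c:.2f}, {s}, {w}"
--             for (i, s, w), st, c in zip(records, starts, counts)]
--     return {"transcript": "turn ID, start time, end time, speaker ID, words\n" + "\n".join(rows)}
-- ===== Notes on version B (the rewrite author's own statement) =====
-- stated objective: alternative
-- what changed: Replaces the single interleaved loop carrying a running start_offset with three separate stages: a parsing pass producing (id, speaker, words) records, a prefix-sum of word counts via itertools.accumulate for the offsets, and a zip-based formatting pass.
import Mathlib
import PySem

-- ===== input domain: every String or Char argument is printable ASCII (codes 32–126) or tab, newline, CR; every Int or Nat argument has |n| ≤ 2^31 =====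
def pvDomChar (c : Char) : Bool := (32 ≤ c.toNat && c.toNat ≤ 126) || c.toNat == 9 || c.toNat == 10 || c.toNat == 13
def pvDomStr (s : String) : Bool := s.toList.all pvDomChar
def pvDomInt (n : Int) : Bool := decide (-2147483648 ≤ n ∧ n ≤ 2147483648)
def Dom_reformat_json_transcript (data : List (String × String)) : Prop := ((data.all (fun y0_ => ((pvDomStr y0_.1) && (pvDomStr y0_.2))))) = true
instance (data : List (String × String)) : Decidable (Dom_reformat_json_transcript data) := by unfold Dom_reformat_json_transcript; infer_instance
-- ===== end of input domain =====

-- B differs from A by decomposition: A interleaves parsing, a running start_offset and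
-- formatting in one loop; B runs a parse pass, a prefix-sum pass for the offsets, and a
-- separate formatting pass (objective: alternative, same cost).

-- shared small helpers (both Pythons contain these exact sub-expressions)
-- f"{n:.2f}" for an int n (offsets are always ints here)
def pvFmt2 (n : Int) : String := PySem.Int.toStr n ++ ".00"
-- [t.strip() for t in transcript.split('\n') if t.strip()]
def pvStripLines (transcript : String) : List String :=
  (((PySem.Str.split? transcript "\n").getD []).map PySem.Str.strip).filter (fun t => t ≠ "")

-- ===== PORT A =====
-- loop body of A: state (formatted_turns, start_offset)
def pvStepA (st : List String × Int) (ti : Int × String) : List String × Int :=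
  if PySem.Str.isIn ":" ti.2 then
    match PySem.Str.splitMax? ti.2 ":" 1 with
    | some [speaker_id, words] =>
      let word_count : Int := ((PySem.Str.split₀ (PySem.Str.strip words)).length : Int)
      let end_offset := st.2 + word_count
      let line := PySem.Int.toStr ti.1 ++ ", " ++ pvFmt2 st.2 ++ ", " ++ pvFmt2 end_offset
                    ++ ", " ++ PySem.Str.strip speaker_id ++ ", " ++ PySem.Str.strip words
      (st.1 ++ [line], end_offset)
    | _ => st   -- unreachable: split(':', 1) with ':' present yields exactly two parts
  else st

def reformat_json_transcript (data : List (String × String)) : List (String × String) :=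
  match (PySem.Dict.mk data).get? "transcript" with
  | none => []   -- Python raises KeyError here; excluded by Pre_
  | some transcript =>
    let turns := pvStripLines transcript
    let res := (PySem.List.enumerate turns).foldl pvStepA ([], (0 : Int))
    [("transcript", "turn ID, start time, end time, speaker ID, words\n" ++ PySem.Str.join "\n" res.1)]

-- ===== PORT B =====
-- parse pass: (i, line) ↦ (i, speaker.strip(), words.strip()) for lines containing ':'
def pvParse (il : Int × String) : Option (Int × String × String) :=
  if PySem.Str.isIn ":" il.2 then
    match PySem.Str.splitMax? il.2 ":" 1 with
    | some [s, w] => some (il.1, PySem.Str.strip s, PySem.Str.strip w)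
    | _ => none
  else none

def pvCounts (records : List (Int × String × String)) : List Int :=
  records.map (fun r => ((PySem.Str.split₀ r.2.2).length : Int))

-- rows = [fmt(...) for rec, st, c in zip(records, accumulate([s0]+counts), counts)]
def pvRows (records : List (Int × String × String)) (s0 : Int) : List String :=
  let counts := pvCounts records
  let starts := List.scanl (· + ·) s0 counts
  ((records.zip starts).zip counts).map (fun p =>
    PySem.Int.toStr p.1.1.1 ++ ", " ++ pvFmt2 p.1.2 ++ ", " ++ pvFmt2 (p.1.2 + p.2)
      ++ ", " ++ p.1.1.2.1 ++ ", " ++ p.1.1.2.2)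

def reformat_json_transcript_alt (data : List (String × String)) : List (String × String) :=
  match (PySem.Dict.mk data).get? "transcript" with
  | none => []   -- Python raises KeyError here; excluded by Pre_
  | some transcript =>
    let records := (PySem.List.enumerate (pvStripLines transcript)).filterMap pvParse
    [("transcript", "turn ID, start time, end time, speaker ID, words\n" ++ PySem.Str.join "\n" (pvRows records 0))]

-- ===== PRECONDITION & SPEC =====
-- Pre_ excludes only inputs whose dict lacks the key "transcript": there Python A (and B) raise KeyError.
def Pre_reformat_json_transcript (data : List (String × String)) : Prop :=
  (PySem.Dict.mk data).contains "transcript" = true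
instance (data : List (String × String)) : Decidable (Pre_reformat_json_transcript data) := by
  unfold Pre_reformat_json_transcript; infer_instance
def pvWitness_reformat_json_transcript : (List (String × String)) := [("transcript", "a: b c")]

def Spec_reformat_json_transcript (data : List (String × String)) (out : List (String × String)) : Prop := out = reformat_json_transcript_alt data
instance (data : List (String × String)) (out : List (String × String)) : Decidable (Spec_reformat_json_transcript data out) := by unfold Spec_reformat_json_transcript; infer_instance

-- ===== CLAIM (what is proved, stated in full; the proofs are below) =====
def Claim_equal_reformat_json_transcript : Prop := ∀ (data : List (String × String)), Dom_reformat_json_transcript data → Pre_reformat_json_transcript data → Spec_reformat_json_transcript data (reformat_json_transcript data)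

-- ===== LEMMAS AND PROOFS =====

-- A's loop body, expressed through B's parse function
theorem pvStepA_eq (st : List String × Int) (ti : Int × String) :
    pvStepA st ti = match pvParse ti with
      | none => st
      | some (i, sp, w) =>
        (st.1 ++ [PySem.Int.toStr i ++ ", " ++ pvFmt2 st.2 ++ ", " ++ pvFmt2 (st.2 + ((PySem.Str.split₀ w).length : Int))
                   ++ ", " ++ sp ++ ", " ++ w],
         st.2 + ((PySem.Str.split₀ w).length : Int)) := by
  unfold pvStepA pvParse
  cases hb : PySem.Str.isIn ":" ti.2
  · simp only [hb]; rfl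
  · simp only [hb]
    rcases hsp : PySem.Str.splitMax? ti.2 ":" 1 with _ | ⟨_ | ⟨a, _ | ⟨b, _ | _⟩⟩⟩ <;>
      simp only [hsp] <;> rfl

theorem pvRows_cons (i : Int) (sp w : String) (recs : List (Int × String × String)) (s0 : Int) :
    pvRows ((i, sp, w) :: recs) s0 =
      (PySem.Int.toStr i ++ ", " ++ pvFmt2 s0 ++ ", " ++ pvFmt2 (s0 + ((PySem.Str.split₀ w).length : Int))
        ++ ", " ++ sp ++ ", " ++ w) :: pvRows recs (s0 + ((PySem.Str.split₀ w).length : Int)) := by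
  simp [pvRows, pvCounts, List.scanl]

theorem foldA_eq (ts : List (Int × String)) :
    ∀ (acc : List String) (s0 : Int),
      (ts.foldl pvStepA (acc, s0)).1 = acc ++ pvRows (ts.filterMap pvParse) s0 := by
  induction ts with
  | nil => intro acc s0; simp [pvRows, pvCounts]
  | cons ti rest ih =>
    intro acc s0
    rw [List.foldl_cons, pvStepA_eq, List.filterMap_cons]
    rcases h : pvParse ti with _ | ⟨i, sp, w⟩
    · simp [ih]
    · simp only [pvRows_cons, ih, List.append_assoc, List.singleton_append]

-- ===== VERDICT (by name: the statement is the Claim_ definition above) =====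
theorem reformat_json_transcript_spec : Claim_equal_reformat_json_transcript := by
  intro data _ _
  unfold Spec_reformat_json_transcript reformat_json_transcript reformat_json_transcript_alt
  rcases h : (PySem.Dict.mk data).get? "transcript" with _ | t
  · rfl
  · simp only [foldA_eq, List.nil_append]
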